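-- pv_equiv track=rewrite | github.com/yeongbin6446/Baekjoon | basic_practice/8. basic_math1/apart.py | people
-- ===== SOURCE A (Python) =====
-- def people(k : int, n : int) -> int:
--     p = 0
--     down = []
--     for i in range(k):
--         for j in range(n):
--             if i == 0:
--                 down.append(j+1)
--             else:
--                 if j == 0 :
--                     down[j] = 1
--                 else:
--                     down[j] = down[j - 1] + down[j]
--     return sum(down)
-- ===== SOURCE B (Python) =====
-- def people(k: int, n: int) -> int:
--     # Closed form: the DP table entry is a binomial coefficient, so the answer
--     # is C(n+k, k+1), computed by a single multiplicative product (exact at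
--     # every step since each partial product is itself a binomial coefficient).
--     if k <= 0 or n <= 0:
--         return 0
--     r = 1
--     for i in range(1, k + 2):
--         r = r * (n + i - 1) // i
--     return r
-- ===== Notes on version B (the rewrite author's own statement) =====
-- stated objective: faster
-- what changed: Replaces the O(k*n) two-level DP (build row 1..n, then k-1 in-place prefix-sum passes) by the closed form C(n+k, k+1), evaluated with a single O(k) exact multiplicative product.
import Mathlib
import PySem

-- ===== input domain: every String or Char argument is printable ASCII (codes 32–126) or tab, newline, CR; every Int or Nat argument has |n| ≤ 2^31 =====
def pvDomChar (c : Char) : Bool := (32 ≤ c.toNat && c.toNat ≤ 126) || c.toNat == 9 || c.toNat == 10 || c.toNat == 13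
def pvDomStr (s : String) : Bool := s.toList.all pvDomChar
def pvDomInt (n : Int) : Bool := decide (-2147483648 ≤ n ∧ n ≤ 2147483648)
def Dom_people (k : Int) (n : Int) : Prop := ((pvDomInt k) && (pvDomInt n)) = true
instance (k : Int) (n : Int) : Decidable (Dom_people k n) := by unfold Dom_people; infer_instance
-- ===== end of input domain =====

-- B replaces the O(k*n) in-place prefix-sum DP by the closed form C(n+k, k+1),
-- computed as a single O(k) multiplicative product (objective: faster, asymptotic).

-- ===== PORT A =====
-- Literal port of A. The unused 'p = 0' is dropped; down[j] reads/writes are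
-- ported with pyGetD/pySetD, exact here since every executed index is in range
-- (down has length n from the i = 0 pass before any i ≥ 1 pass runs).
def people (k : Int) (n : Int) : Int :=
  let down := (PySem.List.pyRange 0 k 1).foldl (fun down i =>
      (PySem.List.pyRange 0 n 1).foldl (fun down j =>
        if i == 0 then down ++ [j + 1]
        else if j == 0 then PySem.List.pySetD down j 1
        else PySem.List.pySetD down j
              (PySem.List.pyGetD down (j - 1) 0 + PySem.List.pyGetD down j 0)) down)
    ([] : List Int)
  down.sum

-- ===== PORT B =====
def people_alt (k : Int) (n : Int) : Int :=
  if k ≤ 0 ∨ n ≤ 0 then 0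
  else (PySem.List.pyRange 1 (k + 2) 1).foldl
         (fun r i => PySem.Int.floordiv (r * (n + i - 1)) i) 1

-- ===== PRECONDITION & SPEC =====
def Spec_people (k : Int) (n : Int) (out : Int) : Prop := out = people_alt k n
instance (k : Int) (n : Int) (out : Int) : Decidable (Spec_people k n out) := by unfold Spec_people; infer_instance

-- ===== CLAIM (what is proved, stated in full; the proofs are below) =====
def Claim_equal_people : Prop := ∀ (k : Int) (n : Int), Dom_people k n → Spec_people k n (people k n)

-- ===== LEMMAS AND PROOFS =====

-- the DP row after t floors: down[m] = C(m+t, t)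
def pvRow (N t : Nat) : List Int := (List.range N).map (fun m => ((m + t).choose t : Nat))

-- A's inner loop body for a floor i ≥ 1
def pvUpd (d : List Int) (j : Int) : List Int :=
  if j == 0 then PySem.List.pySetD d j 1
  else PySem.List.pySetD d j (PySem.List.pyGetD d (j - 1) 0 + PySem.List.pyGetD d j 0)

-- the half-updated row: entries below p already belong to floor t+1
def pvMix (N t p : Nat) : List Int :=
  (List.range N).map (fun m =>
    if m < p then (((m + t + 1).choose (t + 1) : Nat) : Int) else (((m + t).choose t : Nat) : Int))

lemma pvMix_zero (N t : Nat) : pvMix N t 0 = pvRow N t := by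
  simp [pvMix, pvRow]

lemma pvMix_full (N t : Nat) : pvMix N t N = pvRow N (t + 1) := by
  unfold pvMix pvRow
  apply List.map_congr_left
  intro m hm
  simp [List.mem_range.mp hm, Nat.add_assoc]

lemma pvMix_getD (N t p m : Nat) (hm : m < N) :
    (pvMix N t p).getD m 0
      = if m < p then (((m + t + 1).choose (t + 1) : Nat) : Int) else (((m + t).choose t : Nat) : Int) := by
  unfold pvMix
  rw [List.getD_eq_getElem _ _ (by simpa using hm)]
  simp

lemma pvUpd_step (N t p : Nat) (hp : p < N) :
    pvUpd (pvMix N t p) (p : Int) = pvMix N t (p + 1) := by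
  rcases Nat.eq_zero_or_pos p with h0 | hpos
  · subst h0
    simp only [pvUpd, Nat.cast_zero, beq_self_eq_true, if_pos]
    rw [PySem.List.pySetD_of_nonneg _ _ (le_refl 0)]
    apply List.ext_getElem
    · simp [pvMix]
    · intro i h1 h2
      simp only [pvMix, List.getElem_set, List.getElem_map, List.getElem_range,
        Int.toNat_zero]
      by_cases hi : i = 0
      · subst hi
        simp [Nat.choose_self]
      · rw [if_neg (by omega), if_neg (by omega), if_neg (by omega)]
  · have hne : ((p : Int) == 0) = false := by simp; omega
    simp only [pvUpd, hne, Bool.false_eq_true, if_false]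
    have hc1 : (p : Int) - 1 = ((p - 1 : Nat) : Int) := by omega
    rw [hc1, PySem.List.pyGetD_natCast, PySem.List.pyGetD_natCast,
      pvMix_getD N t p (p - 1) (by omega), pvMix_getD N t p p hp,
      PySem.List.pySetD_of_nonneg _ _ (by positivity)]
    have hlt : p - 1 < p := by omega
    rw [if_pos hlt, if_neg (Nat.lt_irrefl p)]
    have hval : (((p - 1 + t + 1).choose (t + 1) : Nat) : Int) + (((p + t).choose t : Nat) : Int)
        = (((p + t + 1).choose (t + 1) : Nat) : Int) := by
      have h1 : p - 1 + t + 1 = p + t := by omega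
      have h2 : (p + t + 1).choose (t + 1) = (p + t).choose t + (p + t).choose (t + 1) :=
        Nat.choose_succ_succ (p + t) t
      rw [h1]
      omega
    rw [hval]
    apply List.ext_getElem
    · simp [pvMix]
    · intro i h1 h2
      simp only [pvMix, List.getElem_set, List.getElem_map, List.getElem_range, Int.toNat_natCast]
      rcases Nat.lt_trichotomy i p with hi | hi | hi
      · rw [if_neg (by omega), if_pos hi, if_pos (by omega)]
      · subst hi
        rw [if_pos rfl, if_pos (by omega)]
      · rw [if_neg (by omega), if_neg (by omega), if_neg (by omega)]

lemma pv_inner (N t : Nat) : ∀ (q p : Nat), p + q = N →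
    (PySem.List.pyRange (p : Int) (N : Int) 1).foldl pvUpd (pvMix N t p) = pvRow N (t + 1) := by
  intro q
  induction q with
  | zero =>
      intro p hp
      rw [PySem.List.pyRange_one_eq_nil (by omega)]
      simp [← hp, pvMix_full]
  | succ q ih =>
      intro p hp
      rw [PySem.List.pyRange_one_cons (by exact_mod_cast (by omega : p < N))]
      rw [List.foldl_cons, pvUpd_step N t p (by omega)]
      have hc : ((p : Int) + 1) = ((p + 1 : Nat) : Int) := by push_cast; ring
      rw [hc]
      exact ih (p + 1) (by omega)

-- one i ≥ 1 floor maps row t to row t+1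
lemma pv_floor (N t : Nat) (i : Int) (hi : i ≠ 0) :
    (PySem.List.pyRange 0 (N : Int) 1).foldl (fun down j =>
        if i == 0 then down ++ [j + 1]
        else if j == 0 then PySem.List.pySetD down j 1
        else PySem.List.pySetD down j
              (PySem.List.pyGetD down (j - 1) 0 + PySem.List.pyGetD down j 0)) (pvRow N t)
      = pvRow N (t + 1) := by
  rw [PySem.List.foldl_congr_mem _ _ pvUpd _ (by intro acc x _; simp [pvUpd, hi])]
  have := pv_inner N t N 0 (by omega)
  simpa [pvMix_zero] using this

-- the first floor (i = 0) builds row 1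
lemma pv_first (N : Nat) :
    (PySem.List.pyRange 0 (N : Int) 1).foldl (fun down j =>
        if (0 : Int) == 0 then down ++ [j + 1]
        else if j == 0 then PySem.List.pySetD down j 1
        else PySem.List.pySetD down j
              (PySem.List.pyGetD down (j - 1) 0 + PySem.List.pyGetD down j 0)) ([] : List Int)
      = pvRow N 1 := by
  simp only [beq_self_eq_true, if_pos]
  rw [PySem.List.foldl_append_singleton_eq_map (fun j => j + 1)]
  rw [PySem.List.pyRange_zero_nat, List.map_map]
  unfold pvRow
  apply List.map_congr_left
  intro m _
  simp [Nat.choose_one_right]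

-- the remaining floors
lemma pv_outer (N : Nat) : ∀ (q : Nat) (a : Int) (t : Nat), 1 ≤ a →
    (PySem.List.pyRange a (a + (q : Int)) 1).foldl (fun down i =>
        (PySem.List.pyRange 0 (N : Int) 1).foldl (fun down j =>
          if i == 0 then down ++ [j + 1]
          else if j == 0 then PySem.List.pySetD down j 1
          else PySem.List.pySetD down j
                (PySem.List.pyGetD down (j - 1) 0 + PySem.List.pyGetD down j 0)) down)
      (pvRow N t) = pvRow N (t + q) := by
  intro q
  induction q with
  | zero =>
      intro a t ha
      rw [PySem.List.pyRange_one_eq_nil (a := a) (b := a + ((0 : Nat) : Int)) (by simp)]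
      simp
  | succ q ih =>
      intro a t ha
      rw [PySem.List.pyRange_one_cons (a := a) (b := a + ((q + 1 : Nat) : Int)) (by push_cast; omega)]
      rw [List.foldl_cons, pv_floor N t a (by omega)]
      have hc : a + ((q + 1 : Nat) : Int) = (a + 1) + (q : Int) := by push_cast; ring
      rw [hc]
      have := ih (a + 1) (t + 1) (by omega)
      simpa [show t + 1 + q = t + (q + 1) from by omega] using this

-- hockey stick: sum of the final row
lemma pv_hockey (K : Nat) : ∀ N : Nat,
    ((List.range N).map (fun m => (m + K).choose K)).sum = (N + K).choose (K + 1) := by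
  intro N
  induction N with
  | zero => simp
  | succ N ih =>
      rw [List.range_succ, List.map_append, List.sum_append]
      simp only [List.map_cons, List.map_nil, List.sum_cons, List.sum_nil, ih]
      have h2 : (N + K + 1).choose (K + 1) = (N + K).choose K + (N + K).choose (K + 1) :=
        Nat.choose_succ_succ (N + K) K
      have h3 : N + 1 + K = N + K + 1 := by omega
      rw [h3, h2]
      omega

lemma pvRow_sum (N K : Nat) : (pvRow N K).sum = (((N + K).choose (K + 1) : Nat) : Int) := by
  have hmap : pvRow N K = List.map (Nat.cast) ((List.range N).map (fun m => (m + K).choose K)) := by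
    simp [pvRow, List.map_map]
  rw [hmap, ← Nat.cast_list_sum, pv_hockey]

-- B's product loop computes the binomial
lemma pv_bfold (N : Nat) (hN : 1 ≤ N) : ∀ (a : Nat),
    (PySem.List.pyRange 1 ((a : Int) + 1) 1).foldl
        (fun r i => PySem.Int.floordiv (r * ((N : Int) + i - 1)) i) 1
      = (((N - 1 + a).choose a : Nat) : Int) := by
  intro a
  induction a with
  | zero =>
      rw [PySem.List.pyRange_one_eq_nil (by simp)]
      simp
  | succ a ih =>
      have hsplit : ((a + 1 : Nat) : Int) + 1 = (((a : Nat) : Int) + 1) + 1 := by push_cast; ring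
      rw [hsplit, PySem.List.pyRange_one_succ_right (by omega), List.foldl_append,
        ih, List.foldl_cons, List.foldl_nil]
      have h1 : (((N - 1 + a).choose a : Nat) : Int) * ((N : Int) + ((a : Int) + 1) - 1)
          = (((N - 1 + a).choose a * (N + a) : Nat) : Int) := by push_cast; ring
      rw [h1]
      have h2 : ((a : Int) + 1) = ((a + 1 : Nat) : Int) := by push_cast; ring
      rw [h2, PySem.Int.floordiv_natCast]
      congr 1
      have h3 : (N + a) * (N - 1 + a).choose a = (N + a).choose (a + 1) * (a + 1) := by
        have := Nat.add_one_mul_choose_eq (N - 1 + a) a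
        have h4 : N - 1 + a + 1 = N + a := by omega
        simpa [h4, Nat.succ_eq_add_one] using this
      rw [Nat.mul_comm ((N - 1 + a).choose a) (N + a), h3, Nat.mul_div_cancel _ (by omega)]
      congr 1
      omega

theorem people_spec_aux : ∀ (k n : Int), people k n = people_alt k n := by
  intro k n
  by_cases h : k ≤ 0 ∨ n ≤ 0
  · rw [people_alt, if_pos h]
    rcases h with hk | hn
    · simp [people, PySem.List.pyRange_one_eq_nil hk]
    · simp [people, PySem.List.pyRange_one_eq_nil (a := 0) (b := n) hn]
  · push Not at h
    obtain ⟨hk, hn⟩ := h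
    set K := k.toNat with hK
    set N := n.toNat with hN
    have hk' : k = (K : Int) := by omega
    have hn' : n = (N : Int) := by omega
    have hK1 : 1 ≤ K := by omega
    have hN1 : 1 ≤ N := by omega
    rw [people, people_alt, if_neg (by omega), hk', hn']
    -- B side
    have h2 : (K : Int) + 2 = ((K + 1 : Nat) : Int) + 1 := by push_cast; ring
    rw [h2, pv_bfold N hN1 (K + 1)]
    -- A side
    rw [PySem.List.pyRange_one_cons (a := 0) (b := (K : Int)) (by exact_mod_cast hK1),
      List.foldl_cons, zero_add, pv_first N]
    have hsplit : (K : Int) = 1 + ((K - 1 : Nat) : Int) := by omega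
    rw [hsplit, pv_outer N (K - 1) 1 1 (le_refl 1), pvRow_sum]
    congr 2 <;> omega

-- ===== VERDICT (by name: the statement is the Claim_ definition above) =====
theorem people_spec : Claim_equal_people := by
  intro k n _
  unfold Spec_people
  exact people_spec_aux k n
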